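-- pv_equiv track=rewrite | github.com/jberkowski/Cracking-Codes-With-Python | freqAnalysis.py | getLanguageMatchScore
-- ===== SOURCE A (Python) =====
-- LANGFREQ = 'ETAOINSHRDLCUMWFGYPBVKJXQZ'
--
-- LETTERS = 'ABCDEFGHIJKLMNOPQRSTUVWXYZ'
--
-- def countLetters(message):
--     '''Return dictionary with letters as keys and number of occurences
--     in message as values.'''
--     # Create dictionary with letters as keys and 0 values:
--     letterCount = {}
--     for letter in LETTERS:
--         letterCount[letter] = 0
--
--     for symbol in message:
--         if symbol.upper() in LETTERS:
--             letterCount[symbol.upper()] += 1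
--     return letterCount
--
-- def getItemAtIndexZero(items):
--     '''Return first element from a tuple.'''
--     return items[0]
--
-- def lettersFreq(message):
--     '''Returns a string of letters sorted by frequency of occurence
--     in message (from highest to lowest). If two or more letters occur the
--     same amount of times in message, their order is reversed compared
--     to a key string.'''
--
--     # Step one:
--     # Count each letter from the message:
--     letterCount = countLetters(message)
--
--     # Step two:
--     # create a dictionary where numbers of occurence in message
--     # are keys and letters are values (reversed dictionary
--     # from 'countLetters' function).
--     lettersFreqDict = {}
--     for letter in letterCount:
--         if letterCount[letter] not in lettersFreqDict:
--             lettersFreqDict[letterCount[letter]] = [letter]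
--         else:
--             lettersFreqDict[letterCount[letter]].append(letter)
--
--     # Step three:
--     # If there are two or more letters with same number of occurence,
--     # sort them in reverse order compared to LANGFREQ.
--     # This is in order to minimize random impact on our analysis.
--     for key in lettersFreqDict:
--         lettersFreqDict[key].sort(key = LANGFREQ.find, reverse = True)
--         # Convert each value list to a string:
--         lettersFreqDict[key] = ''.join(lettersFreqDict[key])
--
--     # Step four:
--     # Sort the letters by frequency of occurence, from highest.
--     lettersFreqList = list(lettersFreqDict.items())
--     lettersFreqList.sort(key = getItemAtIndexZero, reverse = True)
--
--     # Step five: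
--     # Convert the list to string of letters ordered by frequency:
--     freqOrder = []
--     for freqPair in lettersFreqList:
--         freqOrder.append(freqPair[1])
--
--     lettersFreqOrder = ''.join(freqOrder)
--     return lettersFreqOrder
--
-- def getLanguageMatchScore(message):
--     '''Return the number of matches that the string in the message
--     parameter has when its letter frequency is compared to language
--     letter frequency. A "match" is how many of its six most and six
--     least frequent letters are among six most and six least frequent
--     letters for given language.'''
--     freqOrder = lettersFreq(message)
--
--     matchScore = 0  # Set initial score to 0.
--
--     for symbol in freqOrder[:6]:
--         if symbol in LANGFREQ[:6]:
--             matchScore += 1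
--
--     for symbol in freqOrder[-6:]:
--         if symbol in LANGFREQ[-6:]:
--             matchScore += 1
--     return matchScore
-- ===== SOURCE B (Python) =====
-- LANGFREQ = 'ETAOINSHRDLCUMWFGYPBVKJXQZ'
--
-- LETTERS = 'ABCDEFGHIJKLMNOPQRSTUVWXYZ'
--
-- def getLanguageMatchScore(message):
--     counts = dict.fromkeys(LETTERS, 0)
--     for symbol in message.upper():
--         if symbol in counts:
--             counts[symbol] += 1
--     # One composite sort: count descending, ties broken by HIGHER LANGFREQ rank.
--     # LANGFREQ.find(c) lies in 0..25 for every letter, so packing it as the low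
--     # base-26 "digit" of an integer key is exactly the tuple key (count, rank).
--     order = sorted(LETTERS, key=lambda c: 26 * counts[c] + LANGFREQ.find(c), reverse=True)
--     score = sum(1 for c in order[:6] if c in LANGFREQ[:6])
--     return score + sum(1 for c in order[-6:] if c in LANGFREQ[-6:])
-- ===== Notes on version B (the rewrite author's own statement) =====
-- stated objective: simpler
-- what changed: Replaces A's reverse-dictionary grouping (count->letters buckets, per-bucket sort by LANGFREQ rank, then sort of buckets by count) with a single composite-key sort of the 26 letters (26*count + LANGFREQ rank, descending) over a plain counting pass; the counting pass tests dict membership on the already-uppercased symbol instead of calling symbol.upper() and scanning the LETTERS string per symbol.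
import Mathlib
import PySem

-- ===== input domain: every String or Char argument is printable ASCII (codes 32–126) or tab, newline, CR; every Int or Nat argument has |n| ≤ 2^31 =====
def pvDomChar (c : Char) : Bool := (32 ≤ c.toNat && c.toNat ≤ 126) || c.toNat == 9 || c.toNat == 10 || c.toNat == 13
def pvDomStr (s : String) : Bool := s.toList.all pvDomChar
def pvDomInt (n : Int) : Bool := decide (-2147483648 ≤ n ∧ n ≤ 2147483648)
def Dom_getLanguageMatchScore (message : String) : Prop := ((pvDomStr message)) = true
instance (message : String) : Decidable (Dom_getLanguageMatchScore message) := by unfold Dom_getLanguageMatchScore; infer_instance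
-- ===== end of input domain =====

-- B replaces A's reverse-dictionary bucketing by a single composite-key sort of the 26
-- letters (objective: simpler). Python strings built from letters are modelled as List Char.

-- Shared module constants of the Python file.
def pvLANGFREQ : List Char := "ETAOINSHRDLCUMWFGYPBVKJXQZ".toList
def pvLETTERS : List Char := "ABCDEFGHIJKLMNOPQRSTUVWXYZ".toList
-- LANGFREQ.find(c) for a single character c (exact on the ASCII domain).
def pvFind (c : Char) : Int := PySem.Chars.find pvLANGFREQ [c]
-- {letter: 0 for each letter of LETTERS} — built by A's zero-init loop and by B's dict.fromkeys.
def pvInitCount : PySem.Dict Char Int :=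
  pvLETTERS.foldl (fun d letter => d.insert letter (0 : Int)) PySem.Dict.empty

-- ===== PORT A =====
-- countLetters: zero dict over LETTERS, then count symbol.upper() when it is a letter.
-- (On the printable-ASCII domain symbol.upper() is one character, so 'symbol.upper() in
-- LETTERS' is ported as list membership of the uppercased character.)
def pvCountLetters (message : String) : PySem.Dict Char Int :=
  message.toList.foldl (fun d symbol =>
    if pvLETTERS.contains (PySem.Chars.upperChar symbol) then
      d.insert (PySem.Chars.upperChar symbol)
        (d.getD (PySem.Chars.upperChar symbol) 0 + 1)
    else d) pvInitCount

-- lettersFreq: reverse dict count → letters (appending in key order), per-bucket sort by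
-- LANGFREQ.find descending, buckets sorted by count descending, concatenated.
-- (letterCount[letter] is ported as getD _ 0: every iterated letter is a key.)
def pvLettersFreq (message : String) : List Char :=
  let letterCount := pvCountLetters message
  let lettersFreqDict :=
    letterCount.keys.foldl (fun d letter =>
      if (d.contains (letterCount.getD letter 0)) = false then
        d.insert (letterCount.getD letter 0) [letter]
      else
        d.modify (letterCount.getD letter 0) [] (fun g => g ++ [letter]))
      (PySem.Dict.empty : PySem.Dict Int (List Char))
  let sortedDict := lettersFreqDict.items.map (fun p =>
    (p.1, PySem.List.sorted p.2 pvFind true))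
  let lettersFreqList := PySem.List.sorted sortedDict (fun p => p.1) true
  let freqOrder := lettersFreqList.foldl (fun acc freqPair => acc ++ [freqPair.2]) []
  PySem.Chars.join [] freqOrder

def getLanguageMatchScore (message : String) : Int :=
  let freqOrder := pvLettersFreq message
  let matchScore : Int := 0
  let matchScore := (PySem.List.slice freqOrder none (some 6)).foldl
    (fun acc symbol =>
      if (PySem.List.slice pvLANGFREQ none (some 6)).contains symbol then acc + 1 else acc)
    matchScore
  (PySem.List.slice freqOrder (some (-6)) none).foldl
    (fun acc symbol =>
      if (PySem.List.slice pvLANGFREQ (some (-6)) none).contains symbol then acc + 1 else acc)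
    matchScore

-- ===== PORT B =====
-- Source B: count with one dict pass over message.upper(), one composite-key sort
-- (26*count + LANGFREQ rank, descending), two generator-sum matches.
def getLanguageMatchScore_alt (message : String) : Int :=
  let counts := (PySem.Str.upper message).toList.foldl
    (fun d symbol =>
      if d.contains symbol then d.insert symbol (d.getD symbol 0 + 1) else d)
    pvInitCount
  let order := PySem.List.sorted pvLETTERS
    (fun c => 26 * counts.getD c 0 + pvFind c) true
  ((PySem.List.slice order none (some 6)).countP
      (PySem.List.slice pvLANGFREQ none (some 6)).contains : Int)
    + ((PySem.List.slice order (some (-6)) none).countP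
      (PySem.List.slice pvLANGFREQ (some (-6)) none).contains : Int)

-- ===== PRECONDITION & SPEC =====
def Spec_getLanguageMatchScore (message : String) (out : Int) : Prop := out = getLanguageMatchScore_alt message
instance (message : String) (out : Int) : Decidable (Spec_getLanguageMatchScore message out) := by unfold Spec_getLanguageMatchScore; infer_instance

-- ===== CLAIM (what is proved, stated in full; the proofs are below) =====
def Claim_equal_getLanguageMatchScore : Prop := ∀ (message : String), Dom_getLanguageMatchScore message → Spec_getLanguageMatchScore message (getLanguageMatchScore message)

-- ===== LEMMAS AND PROOFS =====

theorem pvNodupLetters : pvLETTERS.Nodup := by decide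

set_option maxRecDepth 8192 in
theorem pvFind_table : pvLETTERS.map pvFind
    = [2, 19, 11, 9, 0, 15, 16, 7, 4, 22, 21, 10, 13, 5, 3, 18, 24, 8, 6, 1, 12, 20, 14, 23, 17, 25] := by
  decide

theorem pvFind_inj : ∀ a ∈ pvLETTERS, ∀ b ∈ pvLETTERS, a ≠ b → pvFind a ≠ pvFind b := by
  intro a ha b hb hne heq
  exact hne (List.inj_on_of_nodup_map (by rw [pvFind_table]; decide) ha hb heq)

theorem pvFind_bound : ∀ a ∈ pvLETTERS, 0 ≤ pvFind a ∧ pvFind a ≤ 25 := by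
  intro a ha
  have hm : pvFind a ∈ pvLETTERS.map pvFind := List.mem_map_of_mem ha
  rw [pvFind_table] at hm
  have : ∀ x ∈ ([2, 19, 11, 9, 0, 15, 16, 7, 4, 22, 21, 10, 13, 5, 3, 18, 24, 8, 6, 1, 12, 20, 14, 23, 17, 25] : List Int), 0 ≤ x ∧ x ≤ 25 := by decide
  exact this _ hm

theorem pvIntersperse_nil_flatten (ls : List (List Char)) :
    (List.intersperse ([] : List Char) ls).flatten = ls.flatten := by
  induction ls with
  | nil => rfl
  | cons a t ih =>
    cases t with
    | nil => rfl
    | cons b t2 =>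
      show ((a :: [] :: List.intersperse [] (b :: t2)) : List (List Char)).flatten = _
      simp only [List.flatten_cons] at ih ⊢
      simp [ih]

theorem pvJoin_nil (ls : List (List Char)) : PySem.Chars.join [] ls = ls.flatten := by
  show (List.intersperse [] ls).flatten = ls.flatten
  exact pvIntersperse_nil_flatten ls

theorem pvSet_update_subset (xs : List Char) (s : PySem.Set Char)
    (h : ∀ x ∈ xs, x ∈ s) : PySem.Set.update s xs = s := by
  induction xs generalizing s with
  | nil => rfl
  | cons x t ih =>
    show PySem.Set.update (PySem.Set.add s x) t = s
    have hadd : PySem.Set.add s x = s := by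
      show (if s.contains x then s else s ++ [x]) = s
      rw [if_pos ((PySem.Set.contains_iff s x).mpr (h x (List.mem_cons_self)))]
    rw [hadd]
    exact ih s (fun y hy => h y (List.mem_cons_of_mem _ hy))

theorem pvSum_map_ite_mem (ks : List Int) (hnd : ks.Nodup) (x : Int) (n : Nat) :
    (ks.map (fun v => if x = v then n else 0)).sum = if x ∈ ks then n else 0 := by
  induction ks with
  | nil => simp
  | cons k t ih =>
    rcases List.nodup_cons.mp hnd with ⟨hk, hnd'⟩
    by_cases hx : x = k
    · subst hx
      simp only [List.map_cons, List.sum_cons, ih hnd',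
        if_neg hk, List.mem_cons, true_or, if_pos]
      omega
    · simp only [List.map_cons, List.sum_cons, if_neg hx, ih hnd', List.mem_cons]
      simp [hx]

set_option maxRecDepth 4096 in
theorem pvInit_keys : pvInitCount.keys = pvLETTERS := by decide

theorem pvInit_contains (c : Char) : pvInitCount.contains c = pvLETTERS.contains c := by
  rw [Bool.eq_iff_iff, PySem.Dict.contains_iff_mem_keys, pvInit_keys,
    List.contains_eq_mem]
  simp

theorem pvCount_fold_contains (l : List Char) (d : PySem.Dict Char Int)
    (h : ∀ c, d.contains c = pvLETTERS.contains c) :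
    l.foldl (fun d symbol =>
      if d.contains symbol then d.insert symbol (d.getD symbol 0 + 1) else d) d
    = l.foldl (fun d symbol =>
      if pvLETTERS.contains symbol then d.insert symbol (d.getD symbol 0 + 1) else d) d := by
  induction l generalizing d with
  | nil => rfl
  | cons s t ih =>
    simp only [List.foldl_cons, h s]
    by_cases hs : pvLETTERS.contains s = true
    · rw [if_pos hs]
      refine ih _ (fun c => ?_)
      rw [PySem.Dict.contains_insert, h c]
      by_cases hc : c = s
      · subst hc; simp only [BEq.rfl, Bool.true_or]; exact hs.symm
      · simp [beq_iff_eq, hc]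
    · rw [if_neg hs]
      exact ih d h

theorem pvCounts_eq (message : String) :
    (PySem.Str.upper message).toList.foldl
      (fun d symbol =>
        if d.contains symbol then d.insert symbol (d.getD symbol 0 + 1) else d)
      pvInitCount = pvCountLetters message := by
  unfold pvCountLetters
  rw [PySem.Str.toList_upper]
  have hup : PySem.Chars.upper message.toList
      = message.toList.map PySem.Chars.upperChar := rfl
  rw [hup, pvCount_fold_contains _ _ pvInit_contains, List.foldl_map]

theorem pvCountLetters_keys (message : String) :
    (pvCountLetters message).keys = pvLETTERS := by
  unfold pvCountLetters
  simp only [PySem.List.foldl_if_eq_foldl_filter]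
  rw [show (fun (d : PySem.Dict Char Int) (symbol : Char) =>
        d.insert (PySem.Chars.upperChar symbol) (d.getD (PySem.Chars.upperChar symbol) 0 + 1))
      = (fun (d : PySem.Dict Char Int) (symbol : Char) =>
        d.insert ((fun s => PySem.Chars.upperChar s) symbol)
          ((fun (d : PySem.Dict Char Int) (s : Char) => d.getD (PySem.Chars.upperChar s) 0 + 1) d symbol)) from rfl]
  rw [PySem.Dict.keys_foldl_insert_key]
  rw [pvInit_keys]
  apply pvSet_update_subset
  intro x hx
  rcases List.mem_map.mp hx with ⟨s, hs, rfl⟩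
  have := List.of_mem_filter hs
  simpa [List.contains_eq_mem] using this

theorem pvFreqDict_items (KI : Char → Int) :
    (pvLETTERS.foldl (fun d letter =>
      if (d.contains (KI letter)) = false then
        d.insert (KI letter) [letter]
      else
        d.modify (KI letter) [] (fun g => g ++ [letter]))
      (PySem.Dict.empty : PySem.Dict Int (List Char))).items
    = (PySem.Set.ofList (pvLETTERS.map KI)).map
        (fun v => (v, pvLETTERS.filter (fun c => KI c == v))) := by
  have hbody : ∀ letter ∈ pvLETTERS, ∀ (d : PySem.Dict Int (List Char)),
      (if (d.contains (KI letter)) = false then d.insert (KI letter) [letter]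
       else d.modify (KI letter) [] (fun g => g ++ [letter]))
      = d.modify (KI letter) [] (fun g => g ++ [letter]) := by
    intro letter _ d
    by_cases h : d.contains (KI letter) = false
    · rw [if_pos h]
      show d.insert (KI letter) [letter]
        = d.insert (KI letter) ((fun g => g ++ [letter]) (d.getD (KI letter) []))
      rw [PySem.Dict.getD_of_not_contains _ _ h]
      rfl
    · rw [if_neg h]
  rw [PySem.List.foldl_congr_mem' pvLETTERS
    (fun d letter => if (d.contains (KI letter)) = false then d.insert (KI letter) [letter]
      else d.modify (KI letter) [] (fun g => g ++ [letter]))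
    (fun d letter => d.modify (KI letter) [] (fun g => g ++ [letter]))
    PySem.Dict.empty hbody]
  set fd := pvLETTERS.foldl
    (fun d letter => d.modify (KI letter) [] (fun g => g ++ [letter]))
    (PySem.Dict.empty : PySem.Dict Int (List Char)) with hfd
  have hkeys : fd.keys = PySem.Set.ofList (pvLETTERS.map KI) := by
    rw [hfd, PySem.Dict.keys_foldl_modify_key pvLETTERS KI []
      (fun d letter => fun g => g ++ [letter])]
    rw [PySem.Dict.keys_empty]
    rw [PySem.Set.ofList_eq_foldl]
    rfl
  have hnd : fd.keys.Nodup := by rw [hkeys]; exact PySem.Set.nodup_ofList _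
  have hgetD : ∀ v, fd.getD v [] = pvLETTERS.filter (fun c => KI c == v) := by
    intro v
    have h := PySem.Dict.getD_foldl_modify_append
      (pvLETTERS.map (fun c => ((KI c, c) : Int × Char)))
      (PySem.Dict.empty : PySem.Dict Int (List Char)) v
    rw [List.foldl_map] at h
    rw [List.filter_map, List.map_map] at h
    rw [hfd]
    simpa [Function.comp_def, PySem.Dict.getD_empty] using h
  rw [PySem.Dict.items_eq_map_keys fd hnd [], hkeys]
  exact List.map_congr_left (fun v _ => by rw [hgetD])

set_option maxHeartbeats 2000000 in
theorem pvGrouped_eq_sorted (KI : Char → Int) :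
    ((PySem.List.sorted
        ((PySem.Set.ofList (pvLETTERS.map KI)).map
          (fun v => (v, PySem.List.sorted (pvLETTERS.filter (fun c => KI c == v)) pvFind true)))
        (fun p => p.1) true).map (fun p => p.2)).flatten
    = PySem.List.sorted pvLETTERS (fun c => 26 * KI c + pvFind c) true := by
  set ks := PySem.Set.ofList (pvLETTERS.map KI) with hks
  set sd := ks.map
    (fun v => (v, PySem.List.sorted (pvLETTERS.filter (fun c => KI c == v)) pvFind true)) with hsd
  set S := PySem.List.sorted sd (fun p => p.1) true with hS
  have hmemS : ∀ p ∈ S, p ∈ sd := fun p hp => (PySem.List.mem_sorted _ _ _ _).mp hp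
  have hsd_mem : ∀ p ∈ sd,
      p.2 = PySem.List.sorted (pvLETTERS.filter (fun c => KI c == p.1)) pvFind true := by
    intro p hp; rcases List.mem_map.mp hp with ⟨v, hv, rfl⟩; rfl
  have hx_mem : ∀ p ∈ sd, ∀ x ∈ p.2, x ∈ pvLETTERS ∧ KI x = p.1 := by
    intro p hp x hx
    rcases List.mem_map.mp hp with ⟨v, hv, rfl⟩
    have h1 := (PySem.List.mem_sorted _ _ _ _).mp hx
    have h2 := List.mem_filter.mp h1
    exact ⟨h2.1, by simpa [beq_iff_eq] using h2.2⟩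
  have hpermS : S.Perm sd := PySem.List.sorted_perm _ _ _
  have hperm : ((S.map (fun p => p.2)).flatten).Perm pvLETTERS := by
    have h2 : (S.map (fun p => p.2)).Perm (sd.map (fun p => p.2)) := hpermS.map _
    have h3 : ((S.map (fun p => p.2)).flatten).Perm ((sd.map (fun p => p.2)).flatten) :=
      h2.flatten
    refine h3.trans ?_
    rw [hsd, List.map_map]
    rw [List.perm_iff_count]
    intro a
    rw [List.count_flatten, List.map_map]
    have hcnt : ∀ v, List.count a
        (PySem.List.sorted (pvLETTERS.filter (fun c => KI c == v)) pvFind true)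
        = if KI a = v then pvLETTERS.count a else 0 := by
      intro v
      rw [(PySem.List.sorted_perm (pvLETTERS.filter (fun c => KI c == v)) pvFind true).count_eq]
      by_cases h : KI a = v
      · rw [if_pos h]; exact List.count_filter (by simp [h])
      · rw [if_neg h]
        apply List.count_eq_zero_of_not_mem
        intro hmem
        exact h (by simpa [beq_iff_eq] using (List.mem_filter.mp hmem).2)
    have hmapeq : ks.map (fun v => List.count a
        (PySem.List.sorted (pvLETTERS.filter (fun c => KI c == v)) pvFind true))
        = ks.map (fun v => if KI a = v then pvLETTERS.count a else 0) :=
      List.map_congr_left (fun v _ => hcnt v)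
    simp only [Function.comp_def]
    rw [hmapeq, pvSum_map_ite_mem ks (PySem.Set.nodup_ofList _) (KI a) (pvLETTERS.count a)]
    by_cases ha : a ∈ pvLETTERS
    · rw [if_pos (by rw [hks]; exact (PySem.Set.mem_ofList _ _).mpr (List.mem_map_of_mem ha))]
    · have h0 : pvLETTERS.count a = 0 := List.count_eq_zero_of_not_mem ha
      rw [h0]; simp
  have hpw : List.Pairwise
      (fun a b => 26 * KI b + pvFind b < 26 * KI a + pvFind a)
      ((S.map (fun p => p.2)).flatten) := by
    rw [List.pairwise_flatten]
    constructor
    · intro g hg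
      rcases List.mem_map.mp hg with ⟨p, hp, rfl⟩
      have hpsd := hmemS p hp
      have hle : List.Pairwise (fun a b => pvFind b ≤ pvFind a) p.2 := by
        rw [hsd_mem p hpsd]; exact PySem.List.sorted_pairwise_rev _ _
      have hnd : List.Pairwise (fun (a b : Char) => a ≠ b) p.2 := by
        rw [hsd_mem p hpsd]
        exact ((PySem.List.sorted_perm _ _ _).nodup_iff).mpr (pvNodupLetters.filter _)
      refine List.Pairwise.imp_of_mem ?_ (hle.and hnd)
      intro a b ha hb hab
      obtain ⟨haL, haK⟩ := hx_mem p hpsd a ha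
      obtain ⟨hbL, hbK⟩ := hx_mem p hpsd b hb
      have hltf : pvFind b < pvFind a :=
        lt_of_le_of_ne hab.1 (pvFind_inj b hbL a haL (Ne.symm hab.2))
      have hKab : KI a = KI b := by rw [haK, hbK]
      omega
    · rw [List.pairwise_map]
      have hfstle : List.Pairwise (fun p q => q.1 ≤ p.1) S :=
        PySem.List.sorted_pairwise_rev sd (fun p => p.1)
      have hndfst : List.Pairwise (fun (p q : Int × List Char) => p.1 ≠ q.1) S := by
        have h1 : (S.map (fun p => p.1)).Perm (sd.map (fun p => p.1)) := hpermS.map _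
        have h2 : sd.map (fun p => p.1) = ks := by
          rw [hsd, List.map_map]; simp [Function.comp_def]
        have h3 : (S.map (fun p => p.1)).Nodup := by
          rw [h1.nodup_iff, h2]; exact PySem.Set.nodup_ofList _
        exact List.pairwise_map.mp h3
      refine List.Pairwise.imp_of_mem ?_ (hfstle.and hndfst)
      intro p q hp hq hpq x hx y hy
      obtain ⟨hxL, hxK⟩ := hx_mem p (hmemS p hp) x hx
      obtain ⟨hyL, hyK⟩ := hx_mem q (hmemS q hq) y hy
      have hltq : q.1 < p.1 := lt_of_le_of_ne hpq.1 (Ne.symm hpq.2)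
      have hbx := pvFind_bound x hxL
      have hby := pvFind_bound y hyL
      omega
  exact (PySem.List.sorted_rev_eq_of_perm_of_pairwise_gt pvLETTERS _ _ hperm hpw).symm

theorem pvLettersFreq_eq (message : String) :
    pvLettersFreq message
    = PySem.List.sorted pvLETTERS
        (fun c => 26 * (pvCountLetters message).getD c 0 + pvFind c) true := by
  unfold pvLettersFreq
  dsimp only
  rw [pvCountLetters_keys]
  rw [pvFreqDict_items (fun c => (pvCountLetters message).getD c 0)]
  rw [List.map_map, PySem.List.foldl_append_singleton_eq_map, pvJoin_nil,
    List.nil_append]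
  have hcomp :
      ((fun p => ((p.1 : Int), PySem.List.sorted (p.2 : List Char) pvFind true))
        ∘ (fun v => (v, pvLETTERS.filter
            (fun c => (pvCountLetters message).getD c 0 == v))))
      = (fun v => (v, PySem.List.sorted (pvLETTERS.filter
          (fun c => (pvCountLetters message).getD c 0 == v)) pvFind true)) := by
    funext v; rfl
  rw [hcomp]
  exact pvGrouped_eq_sorted (fun c => (pvCountLetters message).getD c 0)

-- ===== VERDICT (by name: the statement is the Claim_ definition above) =====
theorem getLanguageMatchScore_spec : Claim_equal_getLanguageMatchScore := by
  intro message _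
  unfold Spec_getLanguageMatchScore getLanguageMatchScore getLanguageMatchScore_alt
  dsimp only
  rw [pvCounts_eq, pvLettersFreq_eq]
  rw [PySem.List.foldl_if_add_one, PySem.List.foldl_if_add_one]
  simp only [List.countP_eq_length_filter]
  omega
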